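-- pv_equiv track=rewrite | github.com/wild233-sys/TicTacToe-ML | ML ai.py | defult
-- ===== SOURCE A (Python) =====
-- def defult(chessboard):
--     defultt=[]
--     can=get_index1(chessboard,0)
--     for i in range(0,9):
--         if i in can:
--             defultt.append(20)
--         if i not in can:
--             defultt.append(0)
--     return defultt
--
-- def get_index1(lst=None, item=''):
--     tmp = []
--     tag = 0
--     for i in lst:
--         if i == item:
--             tmp.append(tag)
--         tag += 1
--     return tmp
-- ===== SOURCE B (Python) =====
-- def defult(chessboard):
--     out = []
--     n = len(chessboard)
--     for i in range(9):
--         cell = chessboard[i] if i < n else 1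
--         out.append(20 if cell == 0 else 0)
--     return out
-- ===== Notes on version B (the rewrite author's own statement) =====
-- stated objective: simpler
-- what changed: B drops A's separate get_index1 index-building pass over the whole board and the per-cell membership scan over that index list, mapping the first nine cells directly to 20/0 in one fixed nine-step pass (cells beyond the board length map to 0).
import Mathlib
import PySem

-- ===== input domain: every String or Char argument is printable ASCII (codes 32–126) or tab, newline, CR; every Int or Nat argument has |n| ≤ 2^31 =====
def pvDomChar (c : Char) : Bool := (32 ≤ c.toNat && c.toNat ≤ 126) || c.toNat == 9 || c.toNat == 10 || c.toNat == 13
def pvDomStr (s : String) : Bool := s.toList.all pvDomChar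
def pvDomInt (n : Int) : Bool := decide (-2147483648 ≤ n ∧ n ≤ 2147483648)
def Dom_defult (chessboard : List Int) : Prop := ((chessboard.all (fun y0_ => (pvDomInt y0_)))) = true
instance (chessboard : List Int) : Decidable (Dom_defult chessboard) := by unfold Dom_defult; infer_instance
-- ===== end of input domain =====

-- B replaces A's index-list construction plus per-cell membership scans by one direct mapping pass (objective: simpler).

-- ===== PORT A =====
-- helper get_index1: indices (tag counter) of elements equal to item
def get_index1 (lst : List Int) (item : Int) : List Int :=
  (lst.foldl (fun (s : List Int × Int) i =>
    (if i = item then s.1 ++ [s.2] else s.1, s.2 + 1)) ([], 0)).1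

def defult (chessboard : List Int) : List Int :=
  let can := get_index1 chessboard 0
  (PySem.List.pyRange 0 9 1).foldl (fun defultt i =>
    let defultt := if i ∈ can then defultt ++ [(20 : Int)] else defultt
    if i ∉ can then defultt ++ [(0 : Int)] else defultt) []

-- ===== PORT B =====
def defult_alt (chessboard : List Int) : List Int :=
  let n : Int := chessboard.length
  (PySem.List.pyRange 0 9 1).foldl (fun out i =>
    let cell : Int := if i < n then PySem.List.pyGetD chessboard i 1 else 1
    out ++ [if cell = 0 then (20 : Int) else 0]) []

-- ===== PRECONDITION & SPEC =====
def Spec_defult (chessboard : List Int) (out : List Int) : Prop := out = defult_alt chessboard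
instance (chessboard : List Int) (out : List Int) : Decidable (Spec_defult chessboard out) := by unfold Spec_defult; infer_instance

-- ===== CLAIM (what is proved, stated in full; the proofs are below) =====
def Claim_equal_defult : Prop := ∀ (chessboard : List Int), Dom_defult chessboard → Spec_defult chessboard (defult chessboard)

-- ===== LEMMAS AND PROOFS =====

-- membership in get_index1's fold, generalized over the accumulator and starting tag
theorem mem_get_index1_aux (lst : List Int) (acc : List Int) (t x : Int) :
    x ∈ (lst.foldl (fun (s : List Int × Int) i =>
      (if i = 0 then s.1 ++ [s.2] else s.1, s.2 + 1)) (acc, t)).1 ↔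
    x ∈ acc ∨ ∃ k : Nat, k < lst.length ∧ lst.getD k 1 = 0 ∧ x = t + k := by
  induction lst generalizing acc t with
  | nil => simp
  | cons hd tl ih =>
    simp only [List.foldl_cons]
    by_cases h : hd = 0
    · rw [if_pos h, ih]
      constructor
      · rintro (hx | ⟨k, hk, hv, hx⟩)
        · rcases List.mem_append.1 hx with hx | hx
          · exact Or.inl hx
          · simp only [List.mem_singleton] at hx
            exact Or.inr ⟨0, by simp, by simp [h], by omega⟩
        · exact Or.inr ⟨k + 1, by simpa using hk, by simpa using hv, by push_cast; omega⟩
      · rintro (hx | ⟨k, hk, hv, hx⟩)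
        · exact Or.inl (List.mem_append.2 (Or.inl hx))
        · cases k with
          | zero => exact Or.inl (List.mem_append.2 (Or.inr (by simp; omega)))
          | succ k =>
            exact Or.inr ⟨k, by simpa using hk, by simpa using hv, by push_cast at hx ⊢; omega⟩
    · rw [if_neg h, ih]
      constructor
      · rintro (hx | ⟨k, hk, hv, hx⟩)
        · exact Or.inl hx
        · exact Or.inr ⟨k + 1, by simpa using hk, by simpa using hv, by push_cast; omega⟩
      · rintro (hx | ⟨k, hk, hv, hx⟩)
        · exact Or.inl hx
        · cases k with
          | zero => simp at hv; exact absurd hv h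
          | succ k =>
            exact Or.inr ⟨k, by simpa using hk, by simpa using hv, by push_cast at hx ⊢; omega⟩

theorem mem_get_index1 (lst : List Int) (x : Int) :
    x ∈ get_index1 lst 0 ↔ ∃ k : Nat, k < lst.length ∧ lst.getD k 1 = 0 ∧ x = (k : Int) := by
  unfold get_index1
  rw [mem_get_index1_aux]
  simp

-- one loop step of A equals one loop step of B, for nonnegative i
theorem step_eq (cb : List Int) (i : Int) (hi : 0 ≤ i) (acc : List Int) :
    (let can := get_index1 cb 0
     let d := if i ∈ can then acc ++ [(20 : Int)] else acc
     if i ∉ can then d ++ [(0 : Int)] else d) =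
    acc ++ [if (if i < (cb.length : Int) then PySem.List.pyGetD cb i 1 else 1) = 0 then (20 : Int) else 0] := by
  have hi' : i = ((i.toNat : Nat) : Int) := by omega
  by_cases hm : i ∈ get_index1 cb 0
  · obtain ⟨k, hk, hv, hx⟩ := (mem_get_index1 cb i).1 hm
    have hlt : i < (cb.length : Int) := by omega
    have hcell : PySem.List.pyGetD cb i 1 = 0 := by
      rw [hx, PySem.List.pyGetD_natCast]; exact hv
    simp [hm, hlt, hcell]
  · have hcell : ¬ ((if i < (cb.length : Int) then PySem.List.pyGetD cb i 1 else 1) = 0) := by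
      split_ifs with hlt
      · intro h0
        apply hm
        rw [mem_get_index1]
        refine ⟨i.toNat, by omega, ?_, by omega⟩
        rw [hi', PySem.List.pyGetD_natCast] at h0
        exact h0
      · norm_num
    simp [hm, hcell]

-- ===== VERDICT (by name: the statement is the Claim_ definition above) =====
theorem defult_spec : Claim_equal_defult := by
  intro cb _
  unfold Spec_defult defult defult_alt
  simp only
  apply PySem.List.foldl_congr_mem
  intro acc x hx
  have hx0 : 0 ≤ x := by
    have := (PySem.List.mem_pyRange_one).1 hx
    omega
  exact step_eq cb x hx0 acc
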